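-- pv_equiv track=rewrite | github.com/lucken99/Qs | xprsequence_prac.py | xorfft
-- ===== SOURCE A (Python) =====
-- def xorfft(a):
--     a = list(a)
--     la = len(a)
--     assert la & (la-1) == 0
--     k = 1
--     while k < la:
--         for i in range(0, la, 2*k):
--             for j in range(i, i+k):
--                 x, y = a[j], a[j+k]
--                 a[j], a[j+k] = x + y, x - y
--         k <<= 1
--     return a
-- ===== SOURCE B (Python) =====
-- def xorfft(a):
--     a = list(a)
--     la = len(a)
--     assert la & (la-1) == 0
--     return _fwht(a)
--
-- def _fwht(a):
--     n = len(a)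
--     if n <= 1:
--         return a
--     h = n // 2
--     tl = _fwht(a[:h])
--     tr = _fwht(a[h:])
--     return [l + r for l, r in zip(tl, tr)] + [l - r for l, r in zip(tl, tr)]
-- ===== Notes on version B (the rewrite author's own statement) =====
-- stated objective: alternative
-- what changed: A's in-place bottom-up butterfly (while-loop doubling k with nested index loops mutating the array) is replaced by a recursive top-down divide-and-conquer FWHT that splits the list in halves, transforms each half recursively and concatenates element-wise sums and differences.
import Mathlib
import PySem

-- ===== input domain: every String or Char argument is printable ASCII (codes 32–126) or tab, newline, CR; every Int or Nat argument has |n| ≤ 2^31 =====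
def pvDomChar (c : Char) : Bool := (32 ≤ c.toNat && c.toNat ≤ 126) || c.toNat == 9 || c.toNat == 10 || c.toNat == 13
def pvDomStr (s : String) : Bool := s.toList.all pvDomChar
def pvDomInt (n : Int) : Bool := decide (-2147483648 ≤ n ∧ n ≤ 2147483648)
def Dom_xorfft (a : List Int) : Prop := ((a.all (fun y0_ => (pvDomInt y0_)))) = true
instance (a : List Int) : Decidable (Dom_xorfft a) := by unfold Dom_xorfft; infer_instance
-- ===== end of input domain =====

-- B replaces A's in-place bottom-up butterfly loops by a recursive top-down divide-and-conquer
-- FWHT (split in halves, transform each, zip sums then differences); same O(n log n) cost.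
-- A mutates only its local copy `list(a)`, so equivalence of return values is full equivalence.

-- ===== PORT A =====
-- Indices of A are always nonnegative, so they are ported as Nat; under Pre_xorfft every
-- access a[j], a[j+k] is in range, so List.getD/List.set are exact there.  The simultaneous
-- assignment `a[j], a[j+k] = x+y, x-y` is two sets of distinct positions (k ≥ 1 in every
-- executed iteration).  The while loop is ported with fuel `len a`, which exceeds the
-- number of doublings of k on every input.
def pyBtfly (k : Nat) (a : List Int) (j : Nat) : List Int :=
  let x := a.getD j 0
  let y := a.getD (j + k) 0
  (a.set j (x + y)).set (j + k) (x - y)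

-- `for j in range(i, i+k)`
def pyInner (k : Nat) (a : List Int) (i : Nat) : List Int :=
  (List.range' i k 1).foldl (pyBtfly k) a

-- `for i in range(0, la, 2*k)` : range(0, la, 2k) has ⌈la/2k⌉ elements
def pyStage (a : List Int) (k : Nat) : List Int :=
  (List.range' 0 ((a.length + 2 * k - 1) / (2 * k)) (2 * k)).foldl (pyInner k) a

def pyLoop : Nat → List Int → Nat → List Int
  | 0, a, _ => a
  | f + 1, a, k => if k < a.length then pyLoop f (pyStage a k) (2 * k) else a

def xorfft (a : List Int) : List Int := pyLoop a.length a 1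

-- ===== PORT B =====
def fwht (a : List Int) : List Int :=
  if a.length ≤ 1 then a
  else
    let h := a.length / 2
    let tl := fwht (a.take h)
    let tr := fwht (a.drop h)
    List.zipWith (· + ·) tl tr ++ List.zipWith (· - ·) tl tr
termination_by a.length
decreasing_by
  · simp only [List.length_take]; omega
  · simp only [List.length_drop]; omega

def xorfft_alt (a : List Int) : List Int := fwht a

-- ===== PRECONDITION & SPEC =====
-- A's `assert la & (la-1) == 0` raises AssertionError unless len(a) is 0 or a power of two;
-- Pre_ is exactly those lengths (the bound t ≤ len only keeps the ∃ decidable).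
def Pre_xorfft (a : List Int) : Prop :=
  a.length = 0 ∨ ∃ t ≤ a.length, a.length = 2 ^ t
instance (a : List Int) : Decidable (Pre_xorfft a) := by unfold Pre_xorfft; infer_instance

def pvWitness_xorfft : List Int := [1, 2, 3, 4]

def Spec_xorfft (a : List Int) (out : List Int) : Prop := out = xorfft_alt a
instance (a : List Int) (out : List Int) : Decidable (Spec_xorfft a out) := by unfold Spec_xorfft; infer_instance

-- ===== CLAIM (what is proved, stated in full; the proofs are below) =====
def Claim_equal_xorfft : Prop := ∀ (a : List Int), Dom_xorfft a → Pre_xorfft a → Spec_xorfft a (xorfft a)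

-- ===== LEMMAS AND PROOFS =====

-- One butterfly stage, described functionally: transform consecutive 2k-chunks.
def chunkT (k : Nat) : List Int → List Int
  | [] => []
  | x :: xs =>
    List.zipWith (· + ·) ((x :: xs).take k) (((x :: xs).drop k).take k)
      ++ List.zipWith (· - ·) ((x :: xs).take k) (((x :: xs).drop k).take k)
      ++ chunkT k (xs.drop (2 * k - 1))
termination_by a => a.length
decreasing_by simp only [List.length_drop, List.length_cons]; omega

lemma length_pyBtfly (k : Nat) (a : List Int) (j : Nat) :
    (pyBtfly k a j).length = a.length := by
  simp [pyBtfly]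

lemma length_pyInner (k : Nat) (a : List Int) (i : Nat) :
    (pyInner k a i).length = a.length := by
  unfold pyInner
  generalize List.range' i k 1 = l
  induction l generalizing a with
  | nil => rfl
  | cons x l ih => simp [List.foldl_cons, ih, length_pyBtfly]

lemma length_pyStage (a : List Int) (k : Nat) :
    (pyStage a k).length = a.length := by
  unfold pyStage
  generalize List.range' 0 ((a.length + 2 * k - 1) / (2 * k)) (2 * k) = l
  induction l generalizing a with
  | nil => rfl
  | cons x l ih => simp [List.foldl_cons, ih, length_pyInner]

lemma inner_spec (k : Nat) :
    ∀ (P Q pre mid post : List Int), P.length = Q.length → P.length + mid.length = k →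
      (List.range' pre.length P.length 1).foldl (pyBtfly k) (pre ++ P ++ mid ++ Q ++ post)
        = pre ++ List.zipWith (· + ·) P Q ++ mid ++ List.zipWith (· - ·) P Q ++ post := by
  intro P
  induction P with
  | nil =>
    intro Q pre mid post hlen hk
    have : Q = [] := List.eq_nil_of_length_eq_zero (by simpa using hlen.symm)
    subst this; simp
  | cons p P' ih =>
    intro Q pre mid post hlen hk
    cases Q with
    | nil => simp at hlen
    | cons q Q' =>
      simp only [List.length_cons, List.range'_succ, List.foldl_cons]
      have hx : (pre ++ (p :: P') ++ mid ++ (q :: Q') ++ post).getD pre.length 0 = p := by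
        have e : pre ++ (p :: P') ++ mid ++ (q :: Q') ++ post
            = pre ++ p :: (P' ++ mid ++ q :: Q' ++ post) := by simp
        rw [e]; simp [List.getD]
      have hy : (pre ++ (p :: P') ++ mid ++ (q :: Q') ++ post).getD (pre.length + k) 0 = q := by
        have e : pre ++ (p :: P') ++ mid ++ (q :: Q') ++ post
            = (pre ++ p :: (P' ++ mid)) ++ q :: (Q' ++ post) := by simp
        have hl : (pre ++ p :: (P' ++ mid)).length = pre.length + k := by
          simp only [List.length_append, List.length_cons]; simp only [List.length_cons] at hk; omega
        rw [e, ← hl]; simp [List.getD]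
      have hset : pyBtfly k (pre ++ (p :: P') ++ mid ++ (q :: Q') ++ post) pre.length
          = (pre ++ [p + q]) ++ P' ++ (mid ++ [p - q]) ++ Q' ++ post := by
        simp only [pyBtfly]
        rw [hx, hy]
        have e1 : pre ++ (p :: P') ++ mid ++ (q :: Q') ++ post
            = pre ++ p :: (P' ++ mid ++ q :: Q' ++ post) := by simp
        rw [e1]
        rw [show (pre ++ p :: (P' ++ mid ++ q :: Q' ++ post)).set pre.length (p + q)
            = pre ++ (p + q) :: (P' ++ mid ++ q :: Q' ++ post) from by simp]
        have e2 : pre ++ (p + q) :: (P' ++ mid ++ q :: Q' ++ post)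
            = (pre ++ (p + q) :: (P' ++ mid)) ++ q :: (Q' ++ post) := by simp
        rw [e2]
        have hl2 : (pre ++ (p + q) :: (P' ++ mid)).length = pre.length + k := by
          simp only [List.length_append, List.length_cons]
          simp only [List.length_cons] at hk; omega
        rw [← hl2]
        rw [show ((pre ++ (p + q) :: (P' ++ mid)) ++ q :: (Q' ++ post)).set
            (pre ++ (p + q) :: (P' ++ mid)).length (p - q)
            = (pre ++ (p + q) :: (P' ++ mid)) ++ (p - q) :: (Q' ++ post) from by simp]
        simp
      rw [hset]
      have hrange : pre.length + 1 = (pre ++ [p + q]).length := by simp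
      rw [hrange, ih Q' (pre ++ [p + q]) (mid ++ [p - q]) post (by simpa using hlen) (by simp at hk ⊢; omega)]
      simp


lemma chunkT_chunk (k : Nat) (hk : 0 < k) (P Q rest : List Int)
    (hP : P.length = k) (hQ : Q.length = k) :
    chunkT k (P ++ Q ++ rest)
      = List.zipWith (· + ·) P Q ++ List.zipWith (· - ·) P Q ++ chunkT k rest := by
  cases P with
  | nil => simp at hP; omega
  | cons x P' =>
    have e : (x :: P') ++ Q ++ rest = x :: (P' ++ (Q ++ rest)) := by simp
    rw [e, chunkT]
    have ht : (x :: (P' ++ (Q ++ rest))).take k = x :: P' := by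
      rw [show x :: (P' ++ (Q ++ rest)) = (x :: P') ++ (Q ++ rest) from by simp]
      exact List.take_left' hP
    have hd : (x :: (P' ++ (Q ++ rest))).drop k = Q ++ rest := by
      rw [show x :: (P' ++ (Q ++ rest)) = (x :: P') ++ (Q ++ rest) from by simp]
      exact List.drop_left' hP
    have hdd : (P' ++ (Q ++ rest)).drop (2 * k - 1) = rest := by
      have h1 : 2 * k - 1 = P'.length + k := by simp at hP; omega
      rw [h1, List.drop_length_add_append, List.drop_left' hQ]
    rw [ht, hd, hdd, List.take_left' hQ]


lemma stage_chunks (k : Nat) (hk : 0 < k) :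
    ∀ n (done rest : List Int), rest.length = 2 * k * n →
      (List.range' done.length n (2 * k)).foldl (pyInner k) (done ++ rest)
        = done ++ chunkT k rest := by
  intro n
  induction n with
  | zero =>
    intro done rest h
    have : rest = [] := List.eq_nil_of_length_eq_zero (by omega)
    subst this
    simp [chunkT]
  | succ n ih =>
    intro done rest h
    set q := 2 * k * n with hq
    have h' : rest.length = q + 2 * k := by rw [h, hq]; ring
    have hP : (rest.take k).length = k := by simp; omega
    have hQ : ((rest.drop k).take k).length = k := by simp; omega
    have hL' : (rest.drop (2 * k)).length = q := by simp; omega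
    have hrest : rest = rest.take k ++ (rest.drop k).take k ++ rest.drop (2 * k) := by
      conv_lhs => rw [← List.take_append_drop k rest]
      rw [List.append_assoc]
      congr 1
      conv_lhs => rw [← List.take_append_drop k (rest.drop k)]
      rw [List.drop_drop]
      congr 2
      omega
    rw [List.range'_succ, List.foldl_cons]
    have hstep : pyInner k (done ++ rest) done.length
        = (done ++ (List.zipWith (· + ·) (rest.take k) ((rest.drop k).take k)
            ++ List.zipWith (· - ·) (rest.take k) ((rest.drop k).take k))) ++ rest.drop (2 * k) := by
      unfold pyInner
      have e : done ++ rest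
          = done ++ rest.take k ++ [] ++ (rest.drop k).take k ++ rest.drop (2 * k) := by
        conv_lhs => rw [hrest]
        simp
      have hinner := inner_spec k (rest.take k) ((rest.drop k).take k) done [] (rest.drop (2 * k))
        (by omega) (by simp only [List.length_nil]; omega)
      rw [hP] at hinner
      rw [e, hinner]
      simp
    rw [hstep]
    have hlen : done.length + 2 * k
        = (done ++ (List.zipWith (· + ·) (rest.take k) ((rest.drop k).take k)
            ++ List.zipWith (· - ·) (rest.take k) ((rest.drop k).take k))).length := by
      simp; omega
    rw [hlen, ih _ _ hL']
    conv_rhs => rw [hrest, chunkT_chunk k hk _ _ _ hP hQ]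
    simp


lemma pyStage_eq_chunkT (a : List Int) (k : Nat) (hk : 0 < k) (hdvd : 2 * k ∣ a.length) :
    pyStage a k = chunkT k a := by
  obtain ⟨n, hn⟩ := hdvd
  unfold pyStage
  have hcount : (a.length + 2 * k - 1) / (2 * k) = n := by
    have e : a.length + 2 * k - 1 = (2 * k - 1) + 2 * k * n := by
      rw [hn]; generalize 2 * k * n = m; omega
    rw [e, Nat.add_mul_div_left _ _ (by omega), Nat.div_eq_of_lt (by omega)]
    omega
  rw [hcount]
  have := stage_chunks k hk n [] a hn
  simpa using this


lemma chunkT_append (k : Nat) (hk : 0 < k) :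
    ∀ n (L R : List Int), L.length = 2 * k * n →
      chunkT k (L ++ R) = chunkT k L ++ chunkT k R := by
  intro n
  induction n with
  | zero =>
    intro L R h
    have : L = [] := List.eq_nil_of_length_eq_zero (by omega)
    subst this
    simp [chunkT]
  | succ n ih =>
    intro L R h
    set q := 2 * k * n with hq
    have h' : L.length = q + 2 * k := by rw [h, hq]; ring
    have hP : (L.take k).length = k := by simp; omega
    have hQ : ((L.drop k).take k).length = k := by simp; omega
    have hL' : (L.drop (2 * k)).length = q := by simp; omega
    have hL : L = L.take k ++ (L.drop k).take k ++ L.drop (2 * k) := by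
      conv_lhs => rw [← List.take_append_drop k L]
      rw [List.append_assoc]
      congr 1
      conv_lhs => rw [← List.take_append_drop k (L.drop k)]
      rw [List.drop_drop]
      congr 2
      omega
    calc chunkT k (L ++ R)
        = chunkT k (L.take k ++ (L.drop k).take k ++ (L.drop (2 * k) ++ R)) := by
          rw [← List.append_assoc, ← hL]
      _ = List.zipWith (· + ·) (L.take k) ((L.drop k).take k)
            ++ List.zipWith (· - ·) (L.take k) ((L.drop k).take k)
            ++ (chunkT k (L.drop (2 * k)) ++ chunkT k R) := by
          rw [chunkT_chunk k hk _ _ _ hP hQ, ih _ R hL']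
      _ = chunkT k L ++ chunkT k R := by
          conv_rhs => rw [hL, chunkT_chunk k hk _ _ _ hP hQ]
          simp


lemma pyLoop_of_ge (f : Nat) (a : List Int) (k : Nat) (h : a.length ≤ k) :
    pyLoop f a k = a := by
  cases f <;> simp [pyLoop, Nat.not_lt.2 h]

lemma pyLoop_fuel :
    ∀ f f' (a : List Int) (k : Nat), 0 < k → a.length ≤ f + k → a.length ≤ f' + k →
      pyLoop f a k = pyLoop f' a k := by
  intro f
  induction f with
  | zero =>
    intro f' a k hk h h'
    rw [pyLoop, pyLoop_of_ge f' a k (by omega)]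
  | succ f ihf =>
    intro f' a k hk h h'
    by_cases hlt : k < a.length
    · cases f' with
      | zero => omega
      | succ f' =>
        rw [pyLoop, pyLoop, if_pos hlt, if_pos hlt]
        exact ihf f' _ _ (by omega)
          (by rw [length_pyStage]; omega) (by rw [length_pyStage]; omega)
    · rw [pyLoop_of_ge _ _ _ (by omega), pyLoop_of_ge _ _ _ (by omega)]


lemma loop_split :
    ∀ d t (L R : List Int) (f fh : Nat),
      L.length = 2 ^ (t + d) → R.length = 2 ^ (t + d) →
      2 ^ (t + d + 1) ≤ f + 2 ^ t → 2 ^ (t + d) ≤ fh + 2 ^ t →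
      pyLoop f (L ++ R) (2 ^ t)
        = List.zipWith (· + ·) (pyLoop fh L (2 ^ t)) (pyLoop fh R (2 ^ t))
          ++ List.zipWith (· - ·) (pyLoop fh L (2 ^ t)) (pyLoop fh R (2 ^ t)) := by
  intro d
  induction d with
  | zero =>
    intro t L R f fh hL hR hf hfh
    simp only [Nat.add_zero] at hL hR hf hfh
    have hpos : 0 < 2 ^ t := by positivity
    have ht1 : 2 ^ (t + 1) = 2 * 2 ^ t := by rw [pow_succ]; ring
    rw [ht1] at hf
    obtain ⟨f₁, rfl⟩ : ∃ f₁, f = f₁ + 1 := by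
      cases f with
      | zero => omega
      | succ f₁ => exact ⟨f₁, rfl⟩
    rw [pyLoop, if_pos (by simp only [List.length_append, hL, hR]; omega)]
    have hstage : pyStage (L ++ R) (2 ^ t)
        = List.zipWith (· + ·) L R ++ List.zipWith (· - ·) L R := by
      rw [pyStage_eq_chunkT _ _ hpos
        (by simp only [List.length_append, hL, hR]; exact ⟨1, by ring⟩)]
      have := chunkT_chunk (2 ^ t) hpos L R [] hL hR
      simpa [chunkT] using this
    rw [hstage]
    have hlen2 : (List.zipWith (· + ·) L R ++ List.zipWith (· - ·) L R).length ≤ 2 * 2 ^ t := by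
      simp [hL, hR]; omega
    rw [pyLoop_of_ge _ _ _ hlen2, pyLoop_of_ge fh L _ (by omega),
      pyLoop_of_ge fh R _ (by omega)]
  | succ d ihd =>
    intro t L R f fh hL hR hf hfh
    have hpos : 0 < 2 ^ t := by positivity
    have ht1 : 2 ^ (t + 1) = 2 * 2 ^ t := by rw [pow_succ]; ring
    have hlt2 : 2 ^ t < 2 ^ (t + (d + 1)) := Nat.pow_lt_pow_right (by omega) (by omega)
    have hlt3 : 2 ^ t < 2 ^ (t + (d + 1) + 1) := Nat.pow_lt_pow_right (by omega) (by omega)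
    obtain ⟨f₁, rfl⟩ : ∃ f₁, f = f₁ + 1 := by
      cases f with
      | zero => omega
      | succ f₁ => exact ⟨f₁, rfl⟩
    obtain ⟨fh₁, rfl⟩ : ∃ fh₁, fh = fh₁ + 1 := by
      cases fh with
      | zero => omega
      | succ fh₁ => exact ⟨fh₁, rfl⟩
    have hklt : 2 ^ t < L.length := by rw [hL]; exact hlt2
    have hklt' : 2 ^ t < R.length := by rw [hR]; exact hlt2
    rw [pyLoop, if_pos (by simp only [List.length_append, hL, hR]; omega)]
    have hdvdL : 2 * 2 ^ t ∣ L.length := by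
      rw [hL, show t + (d + 1) = (t + 1) + d from by ring, pow_add, ht1]
      exact Dvd.intro _ rfl
    have hdvdR : 2 * 2 ^ t ∣ R.length := by
      rw [hR, show t + (d + 1) = (t + 1) + d from by ring, pow_add, ht1]
      exact Dvd.intro _ rfl
    have hstage : pyStage (L ++ R) (2 ^ t) = pyStage L (2 ^ t) ++ pyStage R (2 ^ t) := by
      rw [pyStage_eq_chunkT _ _ hpos
          (by simp only [List.length_append]; exact dvd_add hdvdL hdvdR),
        pyStage_eq_chunkT _ _ hpos hdvdL, pyStage_eq_chunkT _ _ hpos hdvdR]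
      obtain ⟨m, hm⟩ := hdvdL
      exact chunkT_append (2 ^ t) hpos m L R (by rw [hm])
    rw [hstage]
    have hSL : (pyStage L (2 ^ t)).length = 2 ^ ((t + 1) + d) := by
      rw [length_pyStage, hL]; congr 1; ring
    have hSR : (pyStage R (2 ^ t)).length = 2 ^ ((t + 1) + d) := by
      rw [length_pyStage, hR]; congr 1; ring
    rw [show (2 * 2 ^ t) = 2 ^ (t + 1) from ht1.symm]
    have hrec := ihd (t + 1) (pyStage L (2 ^ t)) (pyStage R (2 ^ t)) f₁ (2 ^ ((t + 1) + d))
      hSL hSR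
      (by rw [show (t + 1) + d + 1 = t + (d + 1) + 1 from by ring, ht1]; omega)
      (by omega)
    rw [hrec]
    have hhalfL : pyLoop (fh₁ + 1) L (2 ^ t)
        = pyLoop (2 ^ ((t + 1) + d)) (pyStage L (2 ^ t)) (2 ^ (t + 1)) := by
      rw [pyLoop, if_pos hklt, show (2 * 2 ^ t) = 2 ^ (t + 1) from ht1.symm]
      exact pyLoop_fuel _ _ _ _ (by positivity)
        (by rw [hSL, ht1, show (t + 1) + d = t + (d + 1) from by ring]; omega)
        (by rw [hSL]; omega)
    have hhalfR : pyLoop (fh₁ + 1) R (2 ^ t)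
        = pyLoop (2 ^ ((t + 1) + d)) (pyStage R (2 ^ t)) (2 ^ (t + 1)) := by
      rw [pyLoop, if_pos hklt', show (2 * 2 ^ t) = 2 ^ (t + 1) from ht1.symm]
      exact pyLoop_fuel _ _ _ _ (by positivity)
        (by rw [hSR, ht1, show (t + 1) + d = t + (d + 1) from by ring]; omega)
        (by rw [hSR]; omega)
    rw [hhalfL, hhalfR]

lemma main_aux :
    ∀ n (a : List Int), a.length = n → (n = 0 ∨ ∃ t, n = 2 ^ t) →
      pyLoop n a 1 = fwht a := by
  intro n
  induction n using Nat.strong_induction_on with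
  | _ n ih =>
    intro a hlen hpre
    rcases hpre with h0 | ⟨t, ht⟩
    · subst h0
      rw [fwht, if_pos (by omega)]
      rfl
    · cases t with
      | zero =>
        have hn1 : n = 1 := by simpa using ht
        subst hn1
        rw [fwht, if_pos (by omega)]
        rw [show pyLoop 1 a 1 = if 1 < a.length then pyLoop 0 (pyStage a 1) 2 else a from rfl]
        rw [if_neg (by omega)]
      | succ s =>
        have hpos : 0 < 2 ^ s := by positivity
        have hs : 2 ^ (s + 1) = 2 ^ s * 2 := by rw [pow_succ]
        have hge : 2 ≤ n := by rw [ht, hs]; omega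
        have hTL : (a.take (2 ^ s)).length = 2 ^ s := by simp; omega
        have hTR : (a.drop (2 ^ s)).length = 2 ^ s := by simp; omega
        have hsplit := loop_split s 0 (a.take (2 ^ s)) (a.drop (2 ^ s)) n (2 ^ s)
          (by simpa using hTL) (by simpa using hTR)
          (by rw [Nat.zero_add, ← ht]; simp) (by rw [Nat.zero_add]; simp)
        rw [show (1 : Nat) = 2 ^ 0 from rfl]
        conv_lhs => rw [← List.take_append_drop (2 ^ s) a]
        rw [hsplit]
        have hihL : pyLoop (2 ^ s) (a.take (2 ^ s)) (2 ^ 0) = fwht (a.take (2 ^ s)) := by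
          exact ih (2 ^ s) (by omega) _ hTL (Or.inr ⟨s, rfl⟩)
        have hihR : pyLoop (2 ^ s) (a.drop (2 ^ s)) (2 ^ 0) = fwht (a.drop (2 ^ s)) := by
          exact ih (2 ^ s) (by omega) _ hTR (Or.inr ⟨s, rfl⟩)
        rw [hihL, hihR]
        conv_rhs => rw [fwht]
        rw [if_neg (by omega)]
        have hh : a.length / 2 = 2 ^ s := by rw [hlen, ht, hs]; omega
        rw [hh]
-- ===== VERDICT (by name: the statement is the Claim_ definition above) =====
theorem xorfft_spec : Claim_equal_xorfft := by
  intro a _ hpre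
  unfold Spec_xorfft xorfft xorfft_alt
  apply main_aux _ _ rfl
  rcases hpre with h | ⟨t, _, h⟩
  · exact Or.inl h
  · exact Or.inr ⟨t, h⟩
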